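-- pv_equiv track=rewrite | github.com/jamil-said/code-samples | Python/Python_code_challenges/longestSentenceParagraph.py | longestSentence
-- ===== SOURCE A (Python) =====
-- def longestSentence(strg):
--     result, temp, setC = 0, 0, {'!'}
--     strg2 = strg.replace(',', ' ! ').replace('.', ' ! ').replace('!', ' ! ')
--     for w in strg2.split():
--         if w in setC:
--             temp = 0
--             continue
--         temp += 1
--         result = max(result, temp)
--     return result
-- ===== SOURCE B (Python) =====
-- def longestSentence(strg):
--     # alternative: single scan over the characters; no replace/split passes or intermediate strings
--     best = 0
--     cnt = 0
--     in_word = False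
--     for ch in strg:
--         if ch in (',', '.', '!'):
--             cnt = 0
--             in_word = False
--         elif ch.isspace():
--             in_word = False
--         else:
--             if not in_word:
--                 cnt += 1
--                 best = max(best, cnt)
--             in_word = True
--     return best
-- ===== Notes on version B (the rewrite author's own statement) =====
-- stated objective: alternative
-- what changed: B replaces A's three replace passes plus whitespace re-split of the rebuilt string and token loop by a single character-level scan maintaining (best, count, in_word); it trades CPython's C-level string builtins for one pass with no intermediate strings.
import Mathlib
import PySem

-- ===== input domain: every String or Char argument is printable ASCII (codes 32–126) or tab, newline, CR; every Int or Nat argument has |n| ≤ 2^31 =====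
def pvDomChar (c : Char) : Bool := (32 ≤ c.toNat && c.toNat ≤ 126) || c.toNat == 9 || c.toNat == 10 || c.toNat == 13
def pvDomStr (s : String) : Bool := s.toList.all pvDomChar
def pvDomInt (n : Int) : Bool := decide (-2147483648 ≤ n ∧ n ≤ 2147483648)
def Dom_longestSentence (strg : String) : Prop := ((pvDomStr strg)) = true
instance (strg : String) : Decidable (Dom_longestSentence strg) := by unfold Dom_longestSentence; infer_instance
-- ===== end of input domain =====

-- B: alternative algorithm — one character-level scan with state (best, count, in_word) instead of A's three replace passes, whitespace re-split and token loop.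

-- ===== PORT A =====
def longestSentence (strg : String) : Int :=
  let setC : PySem.Set String := PySem.Set.ofList ["!"]
  let strg2 := PySem.Str.replace (PySem.Str.replace (PySem.Str.replace strg "," " ! ") "." " ! ") "!" " ! "
  ((PySem.Str.split₀ strg2).foldl
    (fun (p : Int × Int) w =>
      if PySem.Set.contains setC w then (p.1, 0)
      else (max p.1 (p.2 + 1), p.2 + 1))
    ((0 : Int), (0 : Int))).1

-- ===== PORT B =====
def longestSentence_alt (strg : String) : Int :=
  (strg.toList.foldl
    (fun (st : Int × Int × Bool) ch =>
      if [',', '.', '!'].contains ch then (st.1, 0, false)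
      else if PySem.Chars.isspace ch then (st.1, st.2.1, false)
      else if !st.2.2 then (max st.1 (st.2.1 + 1), st.2.1 + 1, true)
      else (st.1, st.2.1, true))
    ((0 : Int), (0 : Int), false)).1

-- ===== PRECONDITION & SPEC =====
def Spec_longestSentence (strg : String) (out : Int) : Prop := out = longestSentence_alt strg
instance (strg : String) (out : Int) : Decidable (Spec_longestSentence strg out) := by unfold Spec_longestSentence; infer_instance

-- ===== CLAIM (what is proved, stated in full; the proofs are below) =====
def Claim_equal_longestSentence : Prop := ∀ (strg : String), Dom_longestSentence strg → Spec_longestSentence strg (longestSentence strg)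

-- ===== LEMMAS AND PROOFS =====

-- A's token step, on char-list tokens
def pvStepA (p : Int × Int) (w : List Char) : Int × Int :=
  if w = ['!'] then (p.1, 0) else (max p.1 (p.2 + 1), p.2 + 1)

-- B's char step (the lambda in the port of B)
def pvStepB (st : Int × Int × Bool) (ch : Char) : Int × Int × Bool :=
  if [',', '.', '!'].contains ch then (st.1, 0, false)
  else if PySem.Chars.isspace ch then (st.1, st.2.1, false)
  else if !st.2.2 then (max st.1 (st.2.1 + 1), st.2.1 + 1, true)
  else (st.1, st.2.1, true)

-- single-char replacement by " ! " as a flatMap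
def pvG (d : Char) (c : Char) : List Char := if c = d then [' ', '!', ' '] else [c]

-- the net per-character effect of A's three replaces
def pvH (c : Char) : List Char :=
  if c = ',' then [' ', ' ', '!', ' ', ' ']
  else if c = '.' then [' ', ' ', '!', ' ', ' ']
  else if c = '!' then [' ', '!', ' ']
  else [c]

-- B-state corresponding to A scanning with pending word chars `cur` and state (res, temp)
def pvInit (cur : List Char) (res temp : Int) : Int × Int × Bool :=
  if cur = [] then (res, temp, false) else (max res (temp + 1), temp + 1, true)

lemma pv_go_nil (cur : List Char) (accL : List (List Char)) :
    PySem.Chars.split₀.go [] cur accL = if cur.isEmpty then accL.reverse else (cur.reverse :: accL).reverse := rfl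

lemma pv_go_cons (c : Char) (rest cur : List Char) (accL : List (List Char)) :
    PySem.Chars.split₀.go (c :: rest) cur accL =
      if PySem.Chars.isspace c then
        (if cur.isEmpty then PySem.Chars.split₀.go rest [] accL
         else PySem.Chars.split₀.go rest [] (cur.reverse :: accL))
      else PySem.Chars.split₀.go rest (c :: cur) accL := rfl

lemma pv_go_acc (ys : List Char) : ∀ (cur : List Char) (accL : List (List Char)),
    PySem.Chars.split₀.go ys cur accL = accL.reverse ++ PySem.Chars.split₀.go ys cur [] := by
  induction ys with
  | nil =>
    intro cur accL
    rw [pv_go_nil, pv_go_nil]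
    by_cases h : cur.isEmpty
    · rw [if_pos h, if_pos h]
      simp
    · rw [if_neg h, if_neg h]
      simp
  | cons c rest ih =>
    intro cur accL
    rw [pv_go_cons, pv_go_cons]
    by_cases hs : PySem.Chars.isspace c
    · rw [if_pos hs, if_pos hs]
      by_cases he : cur.isEmpty
      · rw [if_pos he, if_pos he, ih [] accL]
      · rw [if_neg he, if_neg he, ih [] (cur.reverse :: accL), ih [] [cur.reverse]]
        simp
    · rw [if_neg hs, if_neg hs, ih (c :: cur) accL]

-- a space flushes the pending word
lemma pv_go_space (c : Char) (hs : PySem.Chars.isspace c = true) (ys cur : List Char) :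
    PySem.Chars.split₀.go (c :: ys) cur [] =
      (if cur = [] then [] else [cur.reverse]) ++ PySem.Chars.split₀.go ys [] [] := by
  rw [pv_go_cons, if_pos hs]
  cases cur with
  | nil => simp
  | cons a b =>
    rw [if_neg (by simp), if_neg (by simp), pv_go_acc ys [] [(a :: b).reverse]]
    simp

lemma pv_go_sp (ys cur : List Char) :
    PySem.Chars.split₀.go (' ' :: ys) cur [] =
      (if cur = [] then [] else [cur.reverse]) ++ PySem.Chars.split₀.go ys [] [] :=
  pv_go_space ' ' (by decide) ys cur

lemma pv_go_bang (ys : List Char) :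
    PySem.Chars.split₀.go ('!' :: ' ' :: ys) [] [] = ['!'] :: PySem.Chars.split₀.go ys [] [] := by
  rw [pv_go_cons, if_neg (by decide), pv_go_cons, if_pos (by decide),
    if_neg (by simp), pv_go_acc ys [] [['!'].reverse]]
  simp

lemma pv_flush_fold (cur : List Char) (res temp : Int)
    (hgood : ∀ c ∈ cur, PySem.Chars.isspace c = false ∧ c ≠ ',' ∧ c ≠ '.' ∧ c ≠ '!') :
    (if cur = [] then ([] : List (List Char)) else [cur.reverse]).foldl pvStepA (res, temp)
      = ((pvInit cur res temp).1, (pvInit cur res temp).2.1) := by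
  cases cur with
  | nil => simp [pvInit]
  | cons a b =>
    have hne : (a :: b).reverse ≠ ['!'] := by
      intro h
      have hc : (a :: b) = ['!'] := by
        have := congrArg List.reverse h
        simpa using this
      rw [hc] at hgood
      exact (hgood '!' (by simp)).2.2.2 rfl
    have h1 : (if (a :: b) = [] then ([] : List (List Char)) else [(a :: b).reverse]) = [(a :: b).reverse] := by
      simp
    have h2 : pvInit (a :: b) res temp = (max res (temp + 1), temp + 1, true) := by
      simp [pvInit]
    rw [h1, h2, List.foldl_cons, List.foldl_nil]
    unfold pvStepA
    rw [if_neg hne]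

lemma pv_rep_go_zero (old new l acc : List Char) :
    PySem.Chars.replace.go old new 0 l acc = acc.reverse ++ l := rfl

lemma pv_rep_go_nil (old new : List Char) (fuel : Nat) (acc : List Char) :
    PySem.Chars.replace.go old new (fuel + 1) [] acc = acc.reverse := rfl

lemma pv_replace_go (d : Char) : ∀ (s : List Char) (fuel : Nat) (acc : List Char),
    s.length ≤ fuel →
    PySem.Chars.replace.go [d] [' ', '!', ' '] fuel s acc = acc.reverse ++ s.flatMap (pvG d) := by
  intro s
  induction s with
  | nil =>
    intro fuel acc _
    cases fuel with
    | zero => rw [pv_rep_go_zero]; simp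
    | succ fuel => rw [pv_rep_go_nil]; simp
  | cons c t ih =>
    intro fuel acc hf
    cases fuel with
    | zero => simp at hf
    | succ fuel =>
      have hstep : PySem.Chars.replace.go [d] [' ', '!', ' '] (fuel + 1) (c :: t) acc =
          if [d].isPrefixOf (c :: t) then
            PySem.Chars.replace.go [d] [' ', '!', ' '] fuel (List.drop 1 (c :: t)) ([' ', '!', ' '].reverse ++ acc)
          else PySem.Chars.replace.go [d] [' ', '!', ' '] fuel t (c :: acc) := rfl
      have ht : t.length ≤ fuel := by simpa using hf
      by_cases hc : c = d
      · subst hc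
        rw [hstep, if_pos (by simp [List.isPrefixOf]), List.drop_succ_cons, List.drop_zero,
          ih fuel _ ht]
        simp [pvG]
      · rw [hstep, if_neg (by simp [List.isPrefixOf]; intro h; exact hc h.symm),
          ih fuel (c :: acc) ht]
        simp [pvG, hc]

lemma pv_replace_single (d : Char) (s : List Char) :
    PySem.Chars.replace s [d] [' ', '!', ' '] = s.flatMap (pvG d) := by
  have h : PySem.Chars.replace s [d] [' ', '!', ' ']
      = PySem.Chars.replace.go [d] [' ', '!', ' '] s.length s [] := by
    simp [PySem.Chars.replace]
  rw [h, pv_replace_go d s s.length [] (le_refl _)]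
  simp

lemma pv_flat3 (s : List Char) :
    ((s.flatMap (pvG ',')).flatMap (pvG '.')).flatMap (pvG '!') = s.flatMap pvH := by
  induction s with
  | nil => rfl
  | cons c t ih =>
    simp only [List.flatMap_cons, List.flatMap_append]
    rw [ih]
    congr 1
    by_cases h1 : c = ','
    · subst h1; rfl
    · by_cases h2 : c = '.'
      · subst h2; rfl
      · by_cases h3 : c = '!'
        · subst h3; rfl
        · simp [pvG, pvH, h1, h2, h3]

-- core correspondence: A's token fold over split₀ of the expanded chars equals B's scan
lemma pv_core : ∀ (xs cur : List Char) (res temp : Int),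
    (∀ c ∈ cur, PySem.Chars.isspace c = false ∧ c ≠ ',' ∧ c ≠ '.' ∧ c ≠ '!') →
    (PySem.Chars.split₀.go (xs.flatMap pvH) cur []).foldl pvStepA (res, temp)
      = ((xs.foldl pvStepB (pvInit cur res temp)).1, (xs.foldl pvStepB (pvInit cur res temp)).2.1) := by
  intro xs
  induction xs with
  | nil =>
    intro cur res temp hgood
    have hff := pv_flush_fold cur res temp hgood
    cases cur with
    | nil => simpa [pv_go_nil] using hff
    | cons a b => simpa [pv_go_nil] using hff
  | cons c xs ih =>
    intro cur res temp hgood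
    by_cases hd : c = ',' ∨ c = '.' ∨ c = '!'
    · -- delimiter: the expansion emits (flush of cur) then the token "!"
      have hsplit : PySem.Chars.split₀.go ((c :: xs).flatMap pvH) cur [] =
          (if cur = [] then [] else [cur.reverse]) ++ ['!'] :: PySem.Chars.split₀.go (xs.flatMap pvH) [] [] := by
        have hH : pvH c ++ xs.flatMap pvH = ' ' :: ' ' :: '!' :: ' ' :: ' ' :: xs.flatMap pvH ∨
            pvH c ++ xs.flatMap pvH = ' ' :: '!' :: ' ' :: xs.flatMap pvH := by
          rcases hd with h | h | h <;> subst h <;> simp [pvH]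
        rw [List.flatMap_cons]
        rcases hH with h | h
        · rw [h, pv_go_sp, pv_go_sp, pv_go_bang, pv_go_sp]
          simp
        · rw [h, pv_go_sp, pv_go_bang]
      rw [hsplit, List.foldl_append, pv_flush_fold cur res temp hgood, List.foldl_cons]
      have hbang : pvStepA ((pvInit cur res temp).1, (pvInit cur res temp).2.1) ['!'] =
          ((pvInit cur res temp).1, 0) := by simp [pvStepA]
      rw [hbang, ih [] (pvInit cur res temp).1 0 (by simp)]
      have hstep : pvStepB (pvInit cur res temp) c = pvInit [] (pvInit cur res temp).1 0 := by
        rcases hd with h | h | h <;> subst h <;> simp [pvStepB, pvInit]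
      rw [List.foldl_cons, hstep]
    · simp only [not_or] at hd
      obtain ⟨h1, h2, h3⟩ := hd
      have hHc : pvH c = [c] := by simp [pvH, h1, h2, h3]
      by_cases hs : PySem.Chars.isspace c
      · -- space: flush the pending word
        have hsplit : PySem.Chars.split₀.go ((c :: xs).flatMap pvH) cur [] =
            (if cur = [] then [] else [cur.reverse]) ++ PySem.Chars.split₀.go (xs.flatMap pvH) [] [] := by
          rw [List.flatMap_cons, hHc, List.cons_append, List.nil_append, pv_go_space c hs]
        rw [hsplit, List.foldl_append, pv_flush_fold cur res temp hgood,
          ih [] (pvInit cur res temp).1 (pvInit cur res temp).2.1 (by simp)]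
        have hstep : pvStepB (pvInit cur res temp) c =
            pvInit [] (pvInit cur res temp).1 (pvInit cur res temp).2.1 := by
          simp [pvStepB, pvInit, hs, h1, h2, h3]
        rw [List.foldl_cons, hstep]
      · -- word character: extend the pending word
        have hsplit : PySem.Chars.split₀.go ((c :: xs).flatMap pvH) cur [] =
            PySem.Chars.split₀.go (xs.flatMap pvH) (c :: cur) [] := by
          rw [List.flatMap_cons, hHc, List.cons_append, List.nil_append, pv_go_cons,
            if_neg (by simp [hs])]
        have hgood' : ∀ a ∈ (c :: cur), PySem.Chars.isspace a = false ∧ a ≠ ',' ∧ a ≠ '.' ∧ a ≠ '!' := by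
          intro a ha
          rcases List.mem_cons.mp ha with h | h
          · subst h; exact ⟨by simpa using hs, h1, h2, h3⟩
          · exact hgood a h
        rw [hsplit, ih (c :: cur) res temp hgood']
        have hstep : pvStepB (pvInit cur res temp) c = pvInit (c :: cur) res temp := by
          cases cur with
          | nil => simp [pvStepB, pvInit, hs, h1, h2, h3]
          | cons a b => simp [pvStepB, pvInit, hs, h1, h2, h3]
        rw [List.foldl_cons, hstep]

-- bridge: A's string-level step is the char-level step
lemma pv_stepA_str (p : Int × Int) (w : String) :
    (if PySem.Set.contains (PySem.Set.ofList ["!"]) w then (p.1, 0)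
     else (max p.1 (p.2 + 1), p.2 + 1)) = pvStepA p w.toList := by
  have h : PySem.Set.contains (PySem.Set.ofList ["!"]) w = decide (w.toList = ['!']) := by
    have h1 : PySem.Set.contains (PySem.Set.ofList ["!"]) w = (w == "!") := by
      simp [PySem.Set.contains, PySem.Set.ofList, beq_eq_decide]
    rw [h1, beq_eq_decide, decide_eq_decide, ← String.toList_inj]
    rfl
  rw [h]
  unfold pvStepA
  by_cases hw : w.toList = ['!'] <;> simp [hw]

-- ===== VERDICT (by name: the statement is the Claim_ definition above) =====
theorem longestSentence_spec : Claim_equal_longestSentence := by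
  unfold Claim_equal_longestSentence Spec_longestSentence
  intro strg _
  show longestSentence strg = longestSentence_alt strg
  have hA : longestSentence strg =
      ((PySem.Str.split₀ (PySem.Str.replace (PySem.Str.replace (PySem.Str.replace strg "," " ! ") "." " ! ") "!" " ! ")).foldl
        (fun (p : Int × Int) w =>
          if PySem.Set.contains (PySem.Set.ofList ["!"]) w then (p.1, 0)
          else (max p.1 (p.2 + 1), p.2 + 1)) ((0 : Int), (0 : Int))).1 := rfl
  have hB : longestSentence_alt strg = (strg.toList.foldl pvStepB ((0 : Int), (0 : Int), false)).1 := rfl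
  rw [hA, hB]
  have hfun : (fun (p : Int × Int) (w : String) =>
      if PySem.Set.contains (PySem.Set.ofList ["!"]) w then (p.1, 0)
      else (max p.1 (p.2 + 1), p.2 + 1)) = fun p w => pvStepA p w.toList := by
    funext p w
    exact pv_stepA_str p w
  rw [hfun]
  rw [show (PySem.Str.split₀ (PySem.Str.replace (PySem.Str.replace (PySem.Str.replace strg "," " ! ") "." " ! ") "!" " ! ")).foldl
        (fun p w => pvStepA p w.toList) ((0 : Int), (0 : Int))
      = (PySem.Chars.split₀ (PySem.Str.replace (PySem.Str.replace (PySem.Str.replace strg "," " ! ") "." " ! ") "!" " ! ").toList).foldl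
          pvStepA ((0 : Int), (0 : Int)) from by
    rw [← PySem.Str.split₀_map_toList, List.foldl_map]]
  have htol : (PySem.Str.replace (PySem.Str.replace (PySem.Str.replace strg "," " ! ") "." " ! ") "!" " ! ").toList
      = strg.toList.flatMap pvH := by
    rw [PySem.Str.toList_replace, PySem.Str.toList_replace, PySem.Str.toList_replace,
      show ("," : String).toList = [','] from rfl, show ("." : String).toList = ['.'] from rfl,
      show ("!" : String).toList = ['!'] from rfl,
      show (" ! " : String).toList = [' ', '!', ' '] from rfl,
      pv_replace_single, pv_replace_single, pv_replace_single, pv_flat3]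
  rw [htol,
    show PySem.Chars.split₀ (strg.toList.flatMap pvH)
        = PySem.Chars.split₀.go (strg.toList.flatMap pvH) [] [] from rfl,
    pv_core strg.toList [] 0 0 (by simp)]
  simp [pvInit]
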